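-- pv_equiv track=rewrite | github.com/lfdyf20/Leetcode | Remove N Duplicates.py | remove2
-- ===== SOURCE A (Python) =====
-- def remove2(nums, n):
-- 	dic = {}
-- 	res = []
-- 	for i in nums:
-- 		if i in dic:
-- 			dic[i] += 1
-- 		else:
-- 			dic[i] = 1
-- 	for i, num in sorted(dic.items()):
-- 		if num != n:
-- 			res += [i]*num
-- 	return res
-- ===== SOURCE B (Python) =====
-- def remove2(nums, n):
--     s = sorted(nums)
--     res = []
--     i = 0
--     m = len(s)
--     while i < m:
--         j = i + 1
--         while j < m and s[j] == s[i]: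
--             j += 1
--         if j - i != n:
--             res += s[i:j]
--         i = j
--     return res
-- ===== Notes on version B (the rewrite author's own statement) =====
-- stated objective: alternative
-- what changed: Replaced the dict-count-then-sort-items strategy by sorting the whole list once and scanning consecutive equal runs with a two-index walk, emitting each run whose length is not n.
import Mathlib
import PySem

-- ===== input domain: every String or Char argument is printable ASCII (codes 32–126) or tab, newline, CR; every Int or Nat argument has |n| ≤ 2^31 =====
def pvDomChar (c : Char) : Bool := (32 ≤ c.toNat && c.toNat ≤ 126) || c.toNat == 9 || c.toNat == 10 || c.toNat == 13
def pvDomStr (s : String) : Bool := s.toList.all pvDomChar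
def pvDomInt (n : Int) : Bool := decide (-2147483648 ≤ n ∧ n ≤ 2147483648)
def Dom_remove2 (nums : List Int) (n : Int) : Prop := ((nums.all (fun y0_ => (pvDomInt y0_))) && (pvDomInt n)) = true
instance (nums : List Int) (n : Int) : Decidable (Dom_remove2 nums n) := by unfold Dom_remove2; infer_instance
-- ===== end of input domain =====

-- B replaces A's dict-count-then-sort-items strategy by sort-then-scan-equal-runs (alternative algorithm, same asymptotic cost).

-- ===== PORT A =====
def remove2 (nums : List Int) (n : Int) : List Int :=
  let dic := nums.foldl
    (fun d i => if d.contains i then d.insert i (d.getD i 0 + 1) else d.insert i 1)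
    PySem.Dict.empty
  let res : List Int := []
  (PySem.List.sorted2 dic.items Prod.fst Prod.snd).foldl
    (fun res p => if p.2 ≠ n then res ++ PySem.List.pyRepeat [p.1] p.2 else res) res

-- ===== PORT B =====
-- the inner `while j < m and s[j] == s[i]` walk: splits off the run of elements equal to x
def runWalk (x : Int) : List Int → List Int × List Int
  | [] => ([], [])
  | y :: t => if y = x then ((y :: (runWalk x t).1), (runWalk x t).2) else ([], y :: t)

lemma runWalk_snd_length_le (x : Int) : ∀ t : List Int, (runWalk x t).2.length ≤ t.length := by
  intro t
  induction t with
  | nil => simp [runWalk]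
  | cons y t ih =>
    by_cases h : y = x <;> simp [runWalk, h]
    exact Nat.le_succ_of_le ih

def remove2Go (n : Int) : List Int → List Int
  | [] => []
  | x :: t =>
    (if ((runWalk x t).1.length + 1 : Int) ≠ n then x :: (runWalk x t).1 else [])
      ++ remove2Go n (runWalk x t).2
  termination_by L => L.length
  decreasing_by simpa using Nat.lt_succ_of_le (runWalk_snd_length_le x t)


def remove2_alt (nums : List Int) (n : Int) : List Int :=
  remove2Go n (PySem.List.sorted nums (fun x => x) false)

-- ===== PRECONDITION & SPEC =====
def Spec_remove2 (nums : List Int) (n : Int) (out : List Int) : Prop := out = remove2_alt nums n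
instance (nums : List Int) (n : Int) (out : List Int) : Decidable (Spec_remove2 nums n out) := by unfold Spec_remove2; infer_instance

-- ===== CLAIM (what is proved, stated in full; the proofs are below) =====
def Claim_equal_remove2 : Prop := ∀ (nums : List Int) (n : Int), Dom_remove2 nums n → Spec_remove2 nums n (remove2 nums n)

-- ===== LEMMAS AND PROOFS =====

lemma discard_of_not_mem' (s : List Int) (x : Int) (hx : x ∉ s) : PySem.Set.discard s x = s := by
  simp only [PySem.Set.discard]
  exact List.filter_eq_self.mpr (fun y hy => by
    have : y ≠ x := fun h => hx (h ▸ hy)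
    simp [this])

lemma ofList_run (x : Int) : ∀ (r rest : List Int), (∀ y ∈ r, y = x) → x ∉ rest →
    PySem.Set.ofList (x :: (r ++ rest)) = x :: PySem.Set.ofList rest := by
  intro r
  induction r with
  | nil =>
    intro rest _ hx
    rw [List.nil_append, PySem.Set.ofList_cons,
      discard_of_not_mem' _ _ (fun h => hx ((PySem.Set.mem_ofList _ _).mp h))]
  | cons y r ih =>
    intro rest hr hx
    have hy : x = y := (hr y (by simp)).symm
    subst hy
    have h1 := ih rest (fun z hz => hr z (by simp [hz])) hx
    have hxo : x ∉ PySem.Set.ofList rest := fun h => hx ((PySem.Set.mem_ofList _ _).mp h)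
    calc PySem.Set.ofList (x :: (x :: r ++ rest))
        = x :: PySem.Set.discard (PySem.Set.ofList (x :: (r ++ rest))) x := PySem.Set.ofList_cons _ _
      _ = x :: PySem.Set.discard (x :: PySem.Set.ofList rest) x := by rw [h1]
      _ = x :: PySem.Set.ofList rest := by
          have h2 : PySem.Set.discard (x :: PySem.Set.ofList rest) x
              = PySem.Set.discard (PySem.Set.ofList rest) x := by
            simp [PySem.Set.discard]
          rw [h2, discard_of_not_mem' _ _ hxo]


lemma runWalk_eq (x : Int) (t : List Int) :
    runWalk x t = (t.takeWhile (· == x), t.dropWhile (· == x)) := by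
  induction t with
  | nil => simp [runWalk]
  | cons y t ih => by_cases h : y = x <;> simp [runWalk, h, ih]


lemma ofList_sublist : ∀ L : List Int, (PySem.Set.ofList L).Sublist L := by
  intro L
  induction L with
  | nil => simp
  | cons x xs ih =>
    rw [PySem.Set.ofList_cons]
    exact List.Sublist.cons₂ x ((List.filter_sublist).trans ih)

lemma head_dropWhile_ne (p : Int → Bool) (l : List Int) (z : Int) (rs : List Int)
    (h : l.dropWhile p = z :: rs) : p z = false := by
  have hw : (l.dropWhile p) ≠ [] := by simp [h]
  have := List.head_dropWhile_not (l := l) p (w := hw)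
  simp only [h, List.head_cons] at this
  exact this
lemma remove2Go_sorted(n : Int) : ∀ (N : Nat) (L : List Int), L.length ≤ N → L.Pairwise (· ≤ ·) →
    remove2Go n L = (PySem.Set.ofList L).flatMap
      (fun k => if ((L.count k : Int)) ≠ n then List.replicate (L.count k) k else []) := by
  intro N
  induction N with
  | zero =>
    intro L hL _
    have : L = [] := List.length_eq_zero_iff.mp (Nat.le_zero.mp hL)
    subst this
    simp [remove2Go, PySem.Set.ofList]
  | succ N ih =>
    intro L hL hp
    match L with
    | [] => simp [remove2Go, PySem.Set.ofList]
    | x :: t =>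
      set r := t.takeWhile (· == x) with hr_def
      set rest := t.dropWhile (· == x) with hrest_def
      have hsplit : t = r ++ rest := (List.takeWhile_append_dropWhile).symm
      have hr : ∀ y ∈ r, y = x := fun y hy => by
        have := List.mem_takeWhile_imp hy; simpa using this
      have htp : t.Pairwise (· ≤ ·) := (List.pairwise_cons.mp hp).2
      have hxt : ∀ y ∈ t, x ≤ y := (List.pairwise_cons.mp hp).1
      have hrest_sorted : rest.Pairwise (· ≤ ·) := htp.sublist (List.dropWhile_sublist _)
      have hxrest : ∀ y ∈ rest, x < y := by
        intro y hy
        have hw : rest ≠ [] := by intro h; rw [h] at hy; simp at hy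
        obtain ⟨z, rs, hzrs⟩ : ∃ z rs, rest = z :: rs := by
          cases hcc : rest with
          | nil => exact absurd hcc hw
          | cons a b => exact ⟨a, b, rfl⟩
        have hd : t.dropWhile (· == x) = z :: rs := by rw [← hrest_def]; exact hzrs
        have hzx : (z == x) = false := head_dropWhile_ne _ t z rs hd
        have hzmem : z ∈ t := (List.dropWhile_sublist (fun w => w == x)).mem (by rw [hd]; simp)
        have hxz : x < z := lt_of_le_of_ne (hxt z hzmem) (Ne.symm (by simpa using hzx))
        rw [hzrs] at hy
        rcases List.mem_cons.mp hy with h | h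
        · exact h ▸ hxz
        · have hrs : ∀ w ∈ rs, z ≤ w := by
            have h2 := hrest_sorted
            rw [hzrs] at h2
            exact (List.pairwise_cons.mp h2).1
          exact lt_of_lt_of_le hxz (hrs y h)
      have hxnot : x ∉ rest := fun h => lt_irrefl x (hxrest x h)
      have hrcount : r.count x = r.length := List.count_eq_length.mpr (fun b hb => (hr b hb).symm)
      have hcount_x : (x :: t).count x = r.length + 1 := by
        rw [List.count_cons_self, hsplit, List.count_append, hrcount,
          List.count_eq_zero.mpr hxnot]
      have hrepl : List.replicate ((x :: t).count x) x = x :: r := by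
        rw [hcount_x, List.replicate_succ]
        congr 1
        exact (List.eq_replicate_of_mem hr).symm
      have hofList : PySem.Set.ofList (x :: t) = x :: PySem.Set.ofList rest := by
        rw [hsplit]
        exact ofList_run x r rest hr hxnot
      have hcount_rest : ∀ k ∈ PySem.Set.ofList rest, (x :: t).count k = rest.count k := by
        intro k hk
        have hkrest : k ∈ rest := (PySem.Set.mem_ofList _ _).mp hk
        have hkx : k ≠ x := fun h => lt_irrefl x (h ▸ hxrest k hkrest)
        rw [List.count_cons_of_ne (Ne.symm hkx), hsplit, List.count_append,
          List.count_eq_zero.mpr (fun hkr => hkx (hr k hkr))]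
        omega
      have hrest_len : rest.length ≤ N := by
        have h1 : rest.length ≤ t.length := List.Sublist.length_le (List.dropWhile_sublist _)
        simp at hL; omega
      have hIH := ih rest hrest_len hrest_sorted
      rw [remove2Go, runWalk_eq]
      simp only [← hr_def, ← hrest_def]
      rw [hIH, hofList, List.flatMap_cons]
      congr 1
      · have hcast : ((r.length : Int) + 1) = ((x :: t).count x : Int) := by
          rw [hcount_x]; push_cast; ring
        rw [hcast, hrepl]
      · exact (List.flatMap_congr (fun k hk => by rw [hcount_rest k hk])).symm

lemma dic_eq_counter (nums : List Int) :
    nums.foldl (fun d i => if d.contains i then d.insert i (d.getD i 0 + 1) else d.insert i 1)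
      PySem.Dict.empty = PySem.Dict.counter nums := by
  rw [← PySem.Dict.foldl_insert_getD_add_one_eq_counter]
  apply PySem.List.foldl_congr_mem
  intro acc x _
  by_cases h : acc.contains x
  · simp [h]
  · rw [if_neg (by simp [h])]
    rw [PySem.Dict.getD_of_not_contains (d := acc) (k := x) (d0 := 0) (by simpa using h)]
    norm_num

lemma insertBy_congr {α : Type} (b b' : α → α → Bool) (x : α) :
    ∀ ys : List α, (∀ y ∈ ys, b x y = b' x y) →
    PySem.List.insertBy b x ys = PySem.List.insertBy b' x ys := by
  intro ys
  induction ys with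
  | nil => intro _; rfl
  | cons y ys ih =>
    intro h
    simp only [PySem.List.insertBy]
    rw [h y (by simp)]
    by_cases hc : b' x y = true
    · simp [hc]
    · rw [ih (fun z hz => h z (by simp [hz])), if_neg hc]

lemma foldl_insertBy_congr {α : Type} (b b' : α → α → Bool) :
    ∀ (xs acc : List α), (∀ a ∈ xs, ∀ y, (y ∈ acc ∨ y ∈ xs) → b a y = b' a y) →
    xs.foldl (fun acc x => PySem.List.insertBy b x acc) acc
      = xs.foldl (fun acc x => PySem.List.insertBy b' x acc) acc := by
  intro xs
  induction xs with
  | nil => intro acc _; rfl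
  | cons x xs ih =>
    intro acc h
    simp only [List.foldl_cons]
    rw [insertBy_congr b b' x acc (fun y hy => h x (by simp) y (Or.inl hy))]
    apply ih
    intro a ha y hy
    apply h a (by simp [ha])
    rcases hy with hy | hy
    · rcases (PySem.List.mem_insertBy _ _ _ _).mp hy with h1 | h1
      · exact Or.inr (by simp [h1])
      · exact Or.inl h1
    · exact Or.inr (by simp [hy])

lemma sorted2_eq_sorted_fst (items : List (Int × Int)) (hn : (items.map Prod.fst).Nodup) :
    PySem.List.sorted2 items Prod.fst Prod.snd false = PySem.List.sorted items Prod.fst false := by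
  simp only [PySem.List.sorted2, PySem.List.sorted, if_neg (by simp : ¬ (false = true))]
  apply foldl_insertBy_congr
  intro a ha y hy
  rcases hy with hy | hy
  · simp at hy
  · by_cases hfst : a.1 = y.1
    · have : a = y := List.inj_on_of_nodup_map hn ha hy hfst
      subst this
      simp
    · rcases lt_trichotomy a.1 y.1 with h | h | h
      · simp [h]
      · exact absurd h hfst
      · simp [h, not_lt_of_gt h]

theorem main_eq (nums : List Int) (n : Int) : remove2 nums n = remove2_alt nums n := by
  have hScount : ∀ k, (PySem.List.sorted nums (fun x => x) false).count k = nums.count k :=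
    fun k => (PySem.List.sorted_perm nums (fun x => x) false).count_eq k
  -- the common value: flatMap over the sorted distinct elements
  set D := PySem.List.sorted (PySem.Set.ofList nums) (fun x => x) false with hD
  -- A side
  have hn : (((PySem.Dict.counter nums).items).map Prod.fst).Nodup := by
    have := PySem.Dict.nodup_keys_counter nums
    simpa [PySem.Dict.keys] using this
  have hsorted : PySem.List.sorted ((PySem.Dict.counter nums).items) Prod.fst false
      = D.map (fun k => (k, (nums.count k : Int))) := by
    apply PySem.List.sorted_eq_of_perm_of_pairwise_lt
    · rw [PySem.Dict.items_counter]
      exact (PySem.List.sorted_perm _ _ _).map _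
    · rw [List.pairwise_map]
      exact PySem.List.sorted_ofList_pairwise_lt nums
  have hA : remove2 nums n
      = D.flatMap (fun k => if ((nums.count k : Int)) ≠ n then List.replicate (nums.count k) k else []) := by
    show (PySem.List.sorted2 (nums.foldl _ PySem.Dict.empty).items Prod.fst Prod.snd).foldl _ [] = _
    rw [dic_eq_counter, sorted2_eq_sorted_fst _ hn, hsorted]
    rw [PySem.List.foldl_congr_mem
      (l := D.map (fun k => (k, (nums.count k : Int)))) (init := ([] : List Int))
      (f := fun res p => if p.2 ≠ n then res ++ PySem.List.pyRepeat [p.1] p.2 else res)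
      (g := fun (res : List Int) (p : Int × Int) => res ++ (if p.2 ≠ n then PySem.List.pyRepeat [p.1] p.2 else []))
      (by intro acc p _; by_cases h : p.2 ≠ n <;> simp [h])]
    rw [PySem.List.foldl_append_eq_flatMap, List.nil_append, List.flatMap_map]
    apply List.flatMap_congr
    intro k _
    by_cases h : ((nums.count k : Int)) ≠ n <;>
      simp [h, PySem.List.pyRepeat_singleton]
  -- B side
  have hSsorted : (PySem.List.sorted nums (fun x => x) false).Pairwise (· ≤ ·) := by
    have := PySem.List.sorted_pairwise nums (fun x => x)
    simpa using this
  have hof : PySem.Set.ofList (PySem.List.sorted nums (fun x => x) false) = D := by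
    symm
    apply PySem.List.sorted_eq_of_perm_of_pairwise_lt
    · rw [List.perm_ext_iff_of_nodup (PySem.Set.nodup_ofList _) (PySem.Set.nodup_ofList _)]
      intro a
      simp only [PySem.Set.mem_ofList, PySem.List.mem_sorted]
    · have hle : (PySem.Set.ofList (PySem.List.sorted nums (fun x => x) false)).Pairwise (· ≤ ·) :=
        hSsorted.sublist (ofList_sublist _)
      have hne : (PySem.Set.ofList (PySem.List.sorted nums (fun x => x) false)).Pairwise (· ≠ ·) :=
        PySem.Set.nodup_ofList _
      exact (hle.and hne).imp (fun h => lt_of_le_of_ne h.1 h.2)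
  have hB : remove2_alt nums n
      = D.flatMap (fun k => if ((nums.count k : Int)) ≠ n then List.replicate (nums.count k) k else []) := by
    show remove2Go n (PySem.List.sorted nums (fun x => x) false) = _
    rw [remove2Go_sorted n (PySem.List.sorted nums (fun x => x) false).length _ le_rfl hSsorted]
    rw [hof]
    apply List.flatMap_congr
    intro k _
    rw [hScount k]
  rw [hA, hB]

-- ===== VERDICT (by name: the statement is the Claim_ definition above) =====
theorem remove2_spec : Claim_equal_remove2 := by
  intro nums n _
  show remove2 nums n = remove2_alt nums n
  exact main_eq nums n
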